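-- pv_equiv track=rewrite | github.com/Patade-Soham/GetExcited_DSA_python | Problem2.py | primeproduct
-- ===== SOURCE A (Python) =====
-- def primeproduct(m):
--   lis=[]
--   for i in range(2,m):
--     if m%i==0:
--       lis.append(i)
--   if len(lis) == 2:
--     return True
--   else:
--     return False
-- ===== SOURCE B (Python) =====
-- def primeproduct(m):
--     if m < 4:
--         return False
--     count = 0
--     d = 2
--     while d * d <= m:
--         if m % d == 0:
--             count += 1 if d * d == m else 2
--         d += 1
--     return count == 2
-- ===== Notes on version B (the rewrite author's own statement) =====
-- stated objective: faster
-- what changed: Replaced the linear scan of all candidates 2..m-1 that builds a list of divisors with trial division up to sqrt(m) that counts each divisor pair (d, m//d) at once, with an early False for m < 4.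
import Mathlib
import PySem

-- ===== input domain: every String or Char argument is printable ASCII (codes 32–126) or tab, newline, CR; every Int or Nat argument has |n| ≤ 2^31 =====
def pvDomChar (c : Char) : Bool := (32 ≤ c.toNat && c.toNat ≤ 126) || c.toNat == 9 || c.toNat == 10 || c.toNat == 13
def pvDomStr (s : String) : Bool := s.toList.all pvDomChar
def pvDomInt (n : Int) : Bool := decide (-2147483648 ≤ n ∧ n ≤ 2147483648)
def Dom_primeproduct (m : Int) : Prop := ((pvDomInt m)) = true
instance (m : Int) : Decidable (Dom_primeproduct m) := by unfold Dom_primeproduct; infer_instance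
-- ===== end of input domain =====

-- B replaces A's linear scan over 2..m-1 (building a list of divisors) with trial division
-- up to √m that counts each divisor pair at once (objective: faster).

-- ===== PORT A =====
def primeproduct (m : Int) : Bool :=
  let lis := (PySem.List.pyRange 2 m 1).foldl
    (fun lis i => if PySem.Int.mod m i == 0 then lis ++ [i] else lis) []
  if lis.length = 2 then true else false

-- ===== PORT B =====
-- the while loop of Source B; the '2 ≤ d' conjunct only justifies termination (it always holds
-- on the way from the entry call, which starts at d = 2)
def ploopB (m d count : Int) : Int :=
  if h : d * d ≤ m ∧ 2 ≤ d then
    ploopB m (d + 1)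
      (if PySem.Int.mod m d == 0 then count + (if d * d = m then 1 else 2) else count)
  else count
termination_by (m - d).toNat
decreasing_by
  have h2 : d + 2 ≤ d * d := by nlinarith [h.1, h.2]
  omega

def primeproduct_alt (m : Int) : Bool :=
  if m < 4 then false else decide (ploopB m 2 0 = 2)

-- ===== PRECONDITION & SPEC =====
def Spec_primeproduct (m : Int) (out : Bool) : Prop := out = primeproduct_alt m
instance (m : Int) (out : Bool) : Decidable (Spec_primeproduct m out) := by unfold Spec_primeproduct; infer_instance

-- ===== CLAIM (what is proved, stated in full; the proofs are below) =====
def Claim_equal_primeproduct : Prop := ∀ (m : Int), Dom_primeproduct m → Spec_primeproduct m (primeproduct m)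

-- ===== LEMMAS AND PROOFS =====

theorem ico_toFinset (a b : Int) : Finset.Ico a b = (PySem.List.pyRange a b 1).toFinset := by
  ext x; simp [PySem.List.mem_pyRange_one, Finset.mem_Ico]

-- A's result is the number of divisors of m in [2, m)
theorem primeproduct_char (m : Int) :
    primeproduct m = decide ((((Finset.Ico 2 m).filter (fun k => k ∣ m)).card) = 2) := by
  unfold primeproduct
  rw [PySem.List.foldl_append_if_eq_filter]
  have hp : (fun i => PySem.Int.mod m i == 0) = (fun i => decide (i ∣ m)) := by
    funext i
    by_cases h : i ∣ m <;> simp [h, PySem.Int.mod_eq_zero_iff_dvd]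
  have hfin : ((Finset.Ico 2 m).filter (fun k => k ∣ m))
      = ((PySem.List.pyRange 2 m 1).filter (fun i => decide (i ∣ m))).toFinset := by
    rw [List.toFinset_filter, ico_toFinset]
    simp
  rw [List.nil_append, hp, hfin,
      List.toFinset_card_of_nodup ((PySem.List.nodup_pyRange_one 2 m).filter _)]
  by_cases h : (List.filter (fun i => decide (i ∣ m)) (PySem.List.pyRange 2 m 1)).length = 2 <;>
    simp [h]

-- peel the left end of an Int-interval sum
theorem sum_Ico_peel (d m : Int) (h : d < m) (f : Int → Int) :
    ∑ k ∈ Finset.Ico d m, f k = f d + ∑ k ∈ Finset.Ico (d + 1) m, f k := by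
  have hins : Finset.Ico d m = insert d (Finset.Ico (d + 1) m) := by
    ext x; simp [Finset.mem_Ico, Finset.mem_insert]; omega
  rw [hins, Finset.sum_insert (by simp)]

-- loop invariant of B's trial division: it adds the pair-weighted count of the
-- divisors k ≥ d with k * k ≤ m
theorem ploopB_eq (m : Int) : ∀ (n : ℕ) (d c : Int), (m - d).toNat ≤ n → 2 ≤ d →
    ploopB m d c = c + ∑ k ∈ (Finset.Ico d m).filter (fun k => k * k ≤ m ∧ k ∣ m),
      (if k * k = m then (1 : Int) else 2) := by
  intro n
  induction n with
  | zero =>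
    intro d c hn hd
    have hmd : m ≤ d := by omega
    rw [ploopB]
    have hguard : ¬ (d * d ≤ m ∧ 2 ≤ d) := by
      rintro ⟨h1, h2⟩; nlinarith
    rw [dif_neg hguard]
    have : Finset.Ico d m = ∅ := Finset.Ico_eq_empty (by omega)
    simp [this]
  | succ n ih =>
    intro d c hn hd
    rw [ploopB]
    by_cases hguard : d * d ≤ m ∧ 2 ≤ d
    · rw [dif_pos hguard]
      have hdm : d + 2 ≤ m := by nlinarith [hguard.1, hguard.2]
      rw [ih (d + 1) _ (by omega) (by omega)]
      rw [Finset.sum_filter, Finset.sum_filter,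
          sum_Ico_peel d m (by omega) (fun k => if k * k ≤ m ∧ k ∣ m then (if k * k = m then (1:Int) else 2) else 0)]
      by_cases hdvd : d ∣ m
      · have : (PySem.Int.mod m d == 0) = true := by
          simp [PySem.Int.mod_eq_zero_iff_dvd, hdvd]
        rw [this]
        rw [if_pos (show d * d ≤ m ∧ d ∣ m from ⟨hguard.1, hdvd⟩)]
        simp only [if_true]
        ring
      · have : (PySem.Int.mod m d == 0) = false := by
          simp [PySem.Int.mod_eq_zero_iff_dvd, hdvd]
        rw [this]
        simp only [Bool.false_eq_true, if_false]
        rw [if_neg (by tauto)]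
        ring
    · rw [dif_neg hguard]
      have hm : m < d * d := by
        rcases not_and_or.mp hguard with h | h
        · omega
        · omega
      have : (Finset.Ico d m).filter (fun k => k * k ≤ m ∧ k ∣ m) = ∅ := by
        rw [Finset.filter_eq_empty_iff]
        rintro k hk ⟨hk2, _⟩
        rw [Finset.mem_Ico] at hk
        nlinarith [hk.1]
      simp [this]

-- facts about the complementary divisor m / k of a proper divisor k
theorem pair_facts (m k : Int) (hm : 2 ≤ m) (hk2 : 2 ≤ k) (hkm : k < m) (hdvd : k ∣ m) :
    2 ≤ m / k ∧ m / k < m ∧ m / k ∣ m ∧ m / (m / k) = k ∧ m / k * (m / k) * (k * k) = m * m := by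
  obtain ⟨c, hc⟩ := hdvd
  have hk0 : (0:Int) < k := by omega
  have hq : m / k = c := by rw [hc]; exact Int.mul_ediv_cancel_left _ (by omega)
  have hc0 : 0 < c := by nlinarith
  have hc1 : c ≠ 1 := by rintro rfl; omega
  have hc2 : 2 ≤ c := by omega
  have hcm : c < m := by nlinarith
  refine ⟨by omega, by omega, ⟨k, by rw [hq, hc]; ring⟩, ?_, by rw [hq]; nlinarith⟩
  rw [hq, hc, mul_comm]
  exact Int.mul_ediv_cancel_left _ (by omega)

-- divisors above √m are in bijection (k ↦ m / k) with divisors strictly below √m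
theorem card_bij_pairs (m : Int) (hm : 2 ≤ m) :
    (((Finset.Ico 2 m).filter (fun k => k ∣ m)).filter (fun k => ¬ k * k ≤ m)).card
      = (((Finset.Ico 2 m).filter (fun k => k ∣ m)).filter (fun k => k * k < m)).card := by
  apply Finset.card_bij' (i := fun k _ => m / k) (j := fun k _ => m / k)
  · intro k hk
    simp only [Finset.mem_filter, Finset.mem_Ico] at hk ⊢
    obtain ⟨⟨⟨hk2, hkm⟩, hdvd⟩, hkk⟩ := hk
    obtain ⟨h1, h2, h3, h4, h5⟩ := pair_facts m k hm hk2 hkm hdvd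
    exact ⟨⟨⟨h1, h2⟩, h3⟩, by nlinarith⟩
  · intro k hk
    simp only [Finset.mem_filter, Finset.mem_Ico] at hk ⊢
    obtain ⟨⟨⟨hk2, hkm⟩, hdvd⟩, hkk⟩ := hk
    obtain ⟨h1, h2, h3, h4, h5⟩ := pair_facts m k hm hk2 hkm hdvd
    exact ⟨⟨⟨h1, h2⟩, h3⟩, by nlinarith⟩
  · intro k hk
    simp only [Finset.mem_filter, Finset.mem_Ico] at hk
    exact (pair_facts m k hm hk.1.1.1 hk.1.1.2 hk.1.2).2.2.2.1
  · intro k hk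
    simp only [Finset.mem_filter, Finset.mem_Ico] at hk
    exact (pair_facts m k hm hk.1.1.1 hk.1.1.2 hk.1.2).2.2.2.1

-- the divisor count of A equals the pair-weighted count over divisors up to √m
theorem count_pairs (m : Int) (hm : 2 ≤ m) :
    ((((Finset.Ico 2 m).filter (fun k => k ∣ m)).card : Int))
      = ∑ k ∈ (Finset.Ico 2 m).filter (fun k => k * k ≤ m ∧ k ∣ m),
          (if k * k = m then (1 : Int) else 2) := by
  have hS : (Finset.Ico 2 m).filter (fun k => k * k ≤ m ∧ k ∣ m)
      = ((Finset.Ico 2 m).filter (fun k => k ∣ m)).filter (fun k => k * k ≤ m) := by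
    rw [Finset.filter_filter]
    apply Finset.filter_congr
    intro k _; tauto
  have hSS : (((Finset.Ico 2 m).filter (fun k => k ∣ m)).filter (fun k => k * k ≤ m)).filter (fun k => k * k < m)
      = ((Finset.Ico 2 m).filter (fun k => k ∣ m)).filter (fun k => k * k < m) := by
    rw [Finset.filter_filter]
    apply Finset.filter_congr
    intro k _
    constructor
    · tauto
    · intro h; exact ⟨le_of_lt h, h⟩
  have hsum : ∑ k ∈ ((Finset.Ico 2 m).filter (fun k => k ∣ m)).filter (fun k => k * k ≤ m),
        (if k * k = m then (1 : Int) else 2)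
      = ∑ k ∈ ((Finset.Ico 2 m).filter (fun k => k ∣ m)).filter (fun k => k * k ≤ m),
        ((1 : Int) + if k * k < m then 1 else 0) :=
    Finset.sum_congr rfl (fun k hk => by
      have h := (Finset.mem_filter.mp hk).2
      split_ifs with h1 h2 <;> omega)
  rw [hS, hsum, Finset.sum_add_distrib, Finset.sum_const, Finset.sum_boole, hSS]
  simp only [nsmul_eq_mul, mul_one]
  have hsplit := Finset.card_filter_add_card_filter_not
    (s := (Finset.Ico 2 m).filter (fun k => k ∣ m)) (p := fun k => k * k ≤ m)
  have hbij := card_bij_pairs m hm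
  push_cast at hsplit ⊢
  omega

-- for m < 4 there is no divisor in [2, m): a divisor 2 ≤ k < m forces m ≥ 2k ≥ 4
theorem no_divisors_small (m : Int) (h4 : m < 4) :
    (Finset.Ico 2 m).filter (fun k => k ∣ m) = ∅ := by
  rw [Finset.filter_eq_empty_iff]
  intro k hk hdvd
  rw [Finset.mem_Ico] at hk
  obtain ⟨c, hc⟩ := hdvd
  have hc0 : 0 < c := by nlinarith [hk.1, hk.2]
  have hc1 : c ≠ 1 := by rintro rfl; omega
  have hc2 : 2 ≤ c := by omega
  have h42 : (2:Int) * 2 ≤ k * c := mul_le_mul hk.1 hc2 (by omega) (by omega)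
  linarith

-- ===== VERDICT (by name: the statement is the Claim_ definition above) =====
theorem primeproduct_spec : Claim_equal_primeproduct := by
  intro m _
  unfold Spec_primeproduct primeproduct_alt
  rw [primeproduct_char]
  by_cases h4 : m < 4
  · rw [if_pos h4, no_divisors_small m h4]
    simp
  · rw [if_neg h4]
    rw [ploopB_eq m (m - 2).toNat 2 0 (by omega) (by omega), zero_add,
        ← count_pairs m (by omega)]
    simp only [decide_eq_decide]
    omega
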